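-- pv_equiv track=rewrite | github.com/NVlabs/FVRuleLearner | src/mcts_assertion_generation.py | extract_and_parse_items
-- ===== SOURCE A (Python) =====
-- def extract_and_parse_items(coverage_text):
--     items = []
--     lines = coverage_text.split('\n')
--     current_item = {}
--
--     for line in lines:
--         line = line.strip()
--         if line.startswith("ITEM:"):
--             if current_item:
--                 items.append(current_item)
--             current_item = {}
--         elif ":" in line:
--             key, value = line.split(":", 1)
--             key = key.strip().lower().replace(" ", "_")
--             value = value.strip()
--             current_item[key] = value
--
--     if current_item:
--         items.append(current_item)
--
--     return items
-- ===== SOURCE B (Python) =====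
-- def _parse_block(block):
--     d = {}
--     for line in block:
--         s = line.strip()
--         if ":" in s:
--             key, value = s.split(":", 1)
--             d[key.strip().lower().replace(" ", "_")] = value.strip()
--     return d
--
--
-- def extract_and_parse_items(coverage_text):
--     # group-then-parse: first cut the lines into blocks at "ITEM:" markers,
--     # then parse each block and keep the non-empty dicts in order
--     blocks = []
--     block = []
--     for line in coverage_text.split('\n'):
--         if line.strip().startswith("ITEM:"):
--             blocks.append(block)
--             block = []
--         else:
--             block.append(line)
--     blocks.append(block)
--     parsed = [_parse_block(b) for b in blocks]
--     return [d for d in parsed if d]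
-- ===== Notes on version B (the rewrite author's own statement) =====
-- stated objective: alternative
-- what changed: Replaces A's single interleaved stateful scan with a group-then-parse decomposition: one pass cuts the lines into blocks at 'ITEM:' markers, a second pass parses each block into a dict and filters out the empty ones.
import Mathlib
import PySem

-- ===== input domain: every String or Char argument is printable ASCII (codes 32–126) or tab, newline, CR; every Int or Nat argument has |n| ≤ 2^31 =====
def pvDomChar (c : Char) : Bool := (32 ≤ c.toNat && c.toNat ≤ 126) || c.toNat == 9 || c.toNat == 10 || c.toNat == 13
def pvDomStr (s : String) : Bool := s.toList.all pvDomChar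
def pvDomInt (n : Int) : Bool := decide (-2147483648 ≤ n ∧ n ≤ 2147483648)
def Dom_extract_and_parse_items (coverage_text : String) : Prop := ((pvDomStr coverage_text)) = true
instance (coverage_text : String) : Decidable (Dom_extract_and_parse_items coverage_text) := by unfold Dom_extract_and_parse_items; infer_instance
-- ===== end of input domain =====

-- B is an alternative group-then-parse decomposition of A's interleaved scan; return values proved equal on all inputs.

-- ===== PORT A =====
-- the 'elif ":" in line: …' body, shared verbatim by both Pythons' line parsing
def pvParseLine (d : PySem.Dict String String) (line : String) : PySem.Dict String String :=
  let s := PySem.Str.strip line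
  if PySem.Str.isIn ":" s then
    let parts := (PySem.Str.splitMax? s ":" 1).getD []
    d.insert (PySem.Str.replace (PySem.Str.lower (PySem.Str.strip (parts.headD ""))) " " "_")
             (PySem.Str.strip ((parts.drop 1).headD ""))
  else d

def pvStepA (st : List (List (String × String)) × PySem.Dict String String) (line : String) :
    List (List (String × String)) × PySem.Dict String String :=
  if PySem.Str.startswith (PySem.Str.strip line) "ITEM:" then
    (if st.2.items = [] then st.1 else st.1 ++ [st.2.items], PySem.Dict.empty)
  else
    (st.1, pvParseLine st.2 line)

def extract_and_parse_items (coverage_text : String) : List (List (String × String)) :=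
  let st := ((PySem.Str.split? coverage_text "\n").getD []).foldl pvStepA ([], PySem.Dict.empty)
  if st.2.items = [] then st.1 else st.1 ++ [st.2.items]

-- ===== PORT B =====
def pvParseBlock (block : List String) : PySem.Dict String String :=
  block.foldl pvParseLine PySem.Dict.empty

def pvStepB (st : List (List String) × List String) (line : String) :
    List (List String) × List String :=
  if PySem.Str.startswith (PySem.Str.strip line) "ITEM:" then
    (st.1 ++ [st.2], [])
  else
    (st.1, st.2 ++ [line])

def extract_and_parse_items_alt (coverage_text : String) : List (List (String × String)) :=
  let st := ((PySem.Str.split? coverage_text "\n").getD []).foldl pvStepB ([], [])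
  let blocks := st.1 ++ [st.2]
  ((blocks.map (fun b => (pvParseBlock b).items)).filter (· ≠ []))

-- ===== PRECONDITION & SPEC =====
def Spec_extract_and_parse_items (coverage_text : String) (out : List (List (String × String))) : Prop := out = extract_and_parse_items_alt coverage_text
instance (coverage_text : String) (out : List (List (String × String))) : Decidable (Spec_extract_and_parse_items coverage_text out) := by unfold Spec_extract_and_parse_items; infer_instance

-- ===== CLAIM (what is proved, stated in full; the proofs are below) =====
def Claim_equal_extract_and_parse_items : Prop := ∀ (coverage_text : String), Dom_extract_and_parse_items coverage_text → Spec_extract_and_parse_items coverage_text (extract_and_parse_items coverage_text)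

-- ===== LEMMAS AND PROOFS =====

-- turn a block list into B's final answer shape
def pvKeep (blocks : List (List String)) : List (List (String × String)) :=
  (blocks.map (fun b => (pvParseBlock b).items)).filter (· ≠ [])

lemma pvKeep_append_one (blocks : List (List String)) (b : List String) :
    pvKeep (blocks ++ [b]) =
      if (pvParseBlock b).items = [] then pvKeep blocks else pvKeep blocks ++ [(pvParseBlock b).items] := by
  simp [pvKeep, List.filter_append]
  split_ifs with h <;> simp [h]

lemma pvParseBlock_append (b : List String) (l : String) :
    pvParseBlock (b ++ [l]) = pvParseLine (pvParseBlock b) l := by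
  simp [pvParseBlock]

lemma pvMain (ls : List String) : ∀ (blocks : List (List String)) (cur : List String),
    (let st := ls.foldl pvStepA (pvKeep blocks, pvParseBlock cur)
     if st.2.items = [] then st.1 else st.1 ++ [st.2.items]) =
    (let st := ls.foldl pvStepB (blocks, cur)
     pvKeep (st.1 ++ [st.2])) := by
  induction ls with
  | nil =>
    intro blocks cur
    simp only [List.foldl_nil, pvKeep_append_one]
  | cons l ls ih =>
    intro blocks cur
    simp only [List.foldl_cons, pvStepA, pvStepB]
    by_cases h : PySem.Str.startswith (PySem.Str.strip l) "ITEM:" = true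
    · simp only [h, if_true]
      rw [← pvKeep_append_one]
      have := ih (blocks ++ [cur]) []
      simpa [pvParseBlock] using this
    · simp only [h]
      have := ih blocks (cur ++ [l])
      simpa [pvParseBlock_append] using this

-- ===== VERDICT (by name: the statement is the Claim_ definition above) =====
theorem extract_and_parse_items_spec : Claim_equal_extract_and_parse_items := by
  intro t _
  show _ = _
  have h := pvMain ((PySem.Str.split? t "\n").getD []) [] []
  simpa [extract_and_parse_items, extract_and_parse_items_alt, pvKeep, pvParseBlock] using h
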